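-- pv_equiv track=rewrite | github.com/Rehab-Robotics-Lab/FloAssessmentPipeline | bag2video/bag2video.py | get_tiled_image_size
-- ===== SOURCE A (Python) =====
-- def get_tiled_image_size(image_sizes, cols):
--     """Return the total size of a tiled image.
--
--     Images will be tiled across rows (like text in a book)
--     the final image width will be the maximum width of any individual
--     row. Each row height will be the maximum height of any image in
--     the row. The total image height will be the sum of row heights
--
--     Args:
--         image_sizes: a list of image sizes (width x height) ordered for
--                      tiling
--         cols: The number of columns in the final image
--
--     Return: size (width x height) of the final image
--     """
--     row = 0
--     col = 0
--     width = 0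
--     height = 0
--     row_width = 0
--     row_height = 0
--     for im_size in image_sizes:
--         row_width += im_size[1]
--         row_height = max(row_height, im_size[0])
--         col += 1
--         if col == cols:
--             width = max(width, row_width)
--             height += row_height
--             row_width = 0
--             row_height = 0
--             col = 0
--             row += 1
--
--     return (width, height)
-- ===== SOURCE B (Python) =====
-- def get_tiled_image_size(image_sizes, cols):
--     """Return the total size (width, height) of a tiled image.
--
--     Splits the image list into complete rows of `cols` images (the
--     trailing incomplete row contributes nothing), then reduces each
--     row: row width = sum of image widths, row height = tallest image
--     (never below 0). Total width is the widest row, total height the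
--     sum of row heights.
--     """
--     if cols <= 0:
--         return (0, 0)
--     width = 0
--     height = 0
--     rest = image_sizes
--     while len(rest) >= cols:
--         chunk, rest = rest[:cols], rest[cols:]
--         width = max(width, sum(h for _, h in chunk))
--         height += max(0, *(w for w, _ in chunk))
--     return (width, height)
-- ===== Notes on version B (the rewrite author's own statement) =====
-- stated objective: simpler
-- what changed: Replaces A's per-element column-counter state machine (six running variables, row closed when the counter hits cols) by a loop that splits one complete row of cols images off the front at a time and reduces it with sum/max, returning (0,0) directly for cols <= 0.
import Mathlib
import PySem

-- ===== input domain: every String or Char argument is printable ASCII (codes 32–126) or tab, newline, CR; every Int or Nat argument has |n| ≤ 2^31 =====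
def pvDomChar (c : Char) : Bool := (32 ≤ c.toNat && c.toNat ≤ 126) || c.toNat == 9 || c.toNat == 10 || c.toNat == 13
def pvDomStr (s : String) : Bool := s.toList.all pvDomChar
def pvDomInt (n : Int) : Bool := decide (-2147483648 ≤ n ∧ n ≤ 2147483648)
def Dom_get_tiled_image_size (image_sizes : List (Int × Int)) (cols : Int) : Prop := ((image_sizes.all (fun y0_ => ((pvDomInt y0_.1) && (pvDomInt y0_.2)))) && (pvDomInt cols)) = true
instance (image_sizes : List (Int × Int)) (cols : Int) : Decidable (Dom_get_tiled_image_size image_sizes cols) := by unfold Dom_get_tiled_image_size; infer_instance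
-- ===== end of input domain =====

-- B replaces A's per-element column-counter state machine by a loop that splits off
-- one complete row at a time and reduces it (objective: simpler decomposition).

-- ===== PORT A =====
-- state = (row, col, width, height, row_width, row_height), exactly A's variables
def stepA (cols : Int) :
    (Int × Int × Int × Int × Int × Int) → (Int × Int) → (Int × Int × Int × Int × Int × Int)
  | (row, col, width, height, row_width, row_height), im =>
    let row_width := row_width + im.2
    let row_height := max row_height im.1
    let col := col + 1
    if col = cols then (row + 1, 0, max width row_width, height + row_height, 0, 0)
    else (row, col, width, height, row_width, row_height)

def get_tiled_image_size (image_sizes : List (Int × Int)) (cols : Int) : Int × Int :=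
  let s := image_sizes.foldl (stepA cols) (0, 0, 0, 0, 0, 0)
  (s.2.2.1, s.2.2.2.1)

-- ===== PORT B =====
-- the while loop of Source B; `rest[:cols]`/`rest[cols:]` are take/drop (exact: cols > 0 here);
-- the `0 < k` conjunct only makes the recursion total — Source B reaches this loop with cols ≥ 1 only
def altGo (k : Nat) (width height : Int) (rest : List (Int × Int)) : Int × Int :=
  if _h : 0 < k ∧ k ≤ rest.length then
    let chunk := rest.take k
    altGo k (max width (chunk.foldl (fun a s => a + s.2) 0))
      (height + chunk.foldl (fun a s => max a s.1) 0) (rest.drop k)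
  else (width, height)
termination_by rest.length
decreasing_by simp; omega

def get_tiled_image_size_alt (image_sizes : List (Int × Int)) (cols : Int) : Int × Int :=
  if cols ≤ 0 then (0, 0) else altGo cols.toNat 0 0 image_sizes

-- ===== PRECONDITION & SPEC =====
def Spec_get_tiled_image_size (image_sizes : List (Int × Int)) (cols : Int) (out : Int × Int) : Prop := out = get_tiled_image_size_alt image_sizes cols
instance (image_sizes : List (Int × Int)) (cols : Int) (out : Int × Int) : Decidable (Spec_get_tiled_image_size image_sizes cols out) := by unfold Spec_get_tiled_image_size; infer_instance

-- ===== CLAIM (what is proved, stated in full; the proofs are below) =====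
def Claim_equal_get_tiled_image_size : Prop := ∀ (image_sizes : List (Int × Int)) (cols : Int), Dom_get_tiled_image_size image_sizes cols → Spec_get_tiled_image_size image_sizes cols (get_tiled_image_size image_sizes cols)

-- ===== LEMMAS AND PROOFS =====

-- A's fold over a stretch during which the column counter never reaches cols
theorem foldA_no_trigger (cols : Int) (ys : List (Int × Int)) :
    ∀ (c row w h rw rh : Int), (∀ i : Nat, i < ys.length → c + (i : Int) + 1 ≠ cols) →
    ys.foldl (stepA cols) (row, c, w, h, rw, rh) =
      (row, c + ys.length, w, h,
        ys.foldl (fun a s => a + s.2) rw, ys.foldl (fun a s => max a s.1) rh) := by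
  induction ys with
  | nil => intro c row w h rw rh _; simp
  | cons y t ih =>
    intro c row w h rw rh hno
    have h0 : c + 1 ≠ cols := by simpa using hno 0 (by simp)
    simp only [List.foldl_cons, stepA, if_neg h0]
    rw [ih (c + 1) row w h (rw + y.2) (max rh y.1)
      (fun i hi => by
        have := hno (i + 1) (by simpa using Nat.succ_lt_succ hi)
        omega)]
    simp only [List.length_cons]
    congr 2
    push_cast; ring

-- A's fold over a stretch that completes exactly one row (trigger on the last element)
theorem foldA_one_row (cols : Int) (ys : List (Int × Int)) :
    ∀ (c row w h rw rh : Int), ys ≠ [] → c + ys.length = cols →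
    ys.foldl (stepA cols) (row, c, w, h, rw, rh) =
      (row + 1, 0, max w (ys.foldl (fun a s => a + s.2) rw),
        h + ys.foldl (fun a s => max a s.1) rh, 0, 0) := by
  induction ys with
  | nil => intro _ _ _ _ _ _ hne _; exact absurd rfl hne
  | cons y t ih =>
    intro c row w h rw rh _ hlen
    cases t with
    | nil =>
      have hc : c + 1 = cols := by simp at hlen; omega
      simp only [List.foldl_cons, List.foldl_nil, stepA, if_pos hc]
    | cons z t' =>
      have hne : c + 1 ≠ cols := by simp at hlen; omega
      rw [List.foldl_cons]
      simp only [stepA, if_neg hne]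
      rw [ih (c + 1) row w h (rw + y.2) (max rh y.1) (by simp)
        (by simp at hlen ⊢; omega)]
      simp

theorem main_loop (cols : Int) (hc : 0 < cols) :
    ∀ (n : Nat) (xs : List (Int × Int)) (row w h : Int), xs.length = n →
    (let s := xs.foldl (stepA cols) (row, 0, w, h, 0, 0); (s.2.2.1, s.2.2.2.1)) =
      altGo cols.toNat w h xs := by
  intro n
  induction n using Nat.strong_induction_on with
  | _ n ih =>
    intro xs row w h hlen
    by_cases hk : cols.toNat ≤ xs.length
    · -- one complete row, then recurse on the rest
      have hk1 : 0 < cols.toNat := by omega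
      have hcast : ((cols.toNat : Int)) = cols := Int.toNat_of_nonneg (le_of_lt hc)
      have hsplit : xs = xs.take cols.toNat ++ xs.drop cols.toNat := (List.take_append_drop _ _).symm
      have htlen : (xs.take cols.toNat).length = cols.toNat := by simp; omega
      have hne : xs.take cols.toNat ≠ [] := by
        intro he; rw [he] at htlen; simp at htlen; omega
      conv_lhs => rw [hsplit]
      simp only [List.foldl_append]
      rw [foldA_one_row cols (xs.take cols.toNat) 0 row w h 0 0 hne
        (by rw [htlen, hcast]; ring)]
      rw [ih (xs.drop cols.toNat).length (by simp; omega) (xs.drop cols.toNat) (row + 1)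
        (max w ((xs.take cols.toNat).foldl (fun a s => a + s.2) 0))
        (h + (xs.take cols.toNat).foldl (fun a s => max a s.1) 0) rfl]
      conv_rhs => rw [altGo]
      rw [dif_pos (And.intro hk1 (by simpa using hk))]
    · -- incomplete (or empty) trailing stretch: nothing more is added
      have hnot : ¬ (0 < cols.toNat ∧ cols.toNat ≤ xs.length) := by omega
      rw [altGo, dif_neg hnot]
      rw [foldA_no_trigger cols xs 0 row w h 0 0
        (fun i hi => by
          have h1 : (i : Int) + 1 ≤ xs.length := by exact_mod_cast Nat.succ_le_of_lt hi
          have h2 : (xs.length : Int) < cols := by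
            have : xs.length < cols.toNat := by omega
            calc (xs.length : Int) < (cols.toNat : Int) := by exact_mod_cast this
              _ = cols := Int.toNat_of_nonneg (le_of_lt hc)
          intro he; simp at he; omega)]

theorem cols_nonpos (cols : Int) (hc : cols ≤ 0) (xs : List (Int × Int)) :
    get_tiled_image_size xs cols = (0, 0) := by
  unfold get_tiled_image_size
  rw [foldA_no_trigger cols xs 0 0 0 0 0 0
    (fun i hi => by intro he; omega)]

-- ===== VERDICT (by name: the statement is the Claim_ definition above) =====
theorem get_tiled_image_size_spec : Claim_equal_get_tiled_image_size := by
  intro xs cols _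
  unfold Spec_get_tiled_image_size get_tiled_image_size_alt
  by_cases hc : cols ≤ 0
  · rw [if_pos hc, cols_nonpos cols hc xs]
  · rw [if_neg hc]
    have := main_loop cols (by omega) xs.length xs 0 0 0 rfl
    simpa [get_tiled_image_size] using this
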